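-- pv_equiv track=rewrite | github.com/marcelsetz/BDC | Assignment4/assignment4.py | calculate_phred_scores
-- ===== SOURCE A (Python) =====
-- def calculate_phred_scores(quality_scores):
--     """Calculates the sum and count of PHRED scores for a chunk."""
--     phred_sums = []
--     counts = []
--     for line in quality_scores:
--         for index, char in enumerate(line):
--             score = ord(char) - 33
--             if len(phred_sums) <= index:
--                 phred_sums.append(score)
--                 counts.append(1)
--             else:
--                 phred_sums[index] += score
--                 counts[index] += 1
--     return phred_sums, counts
-- ===== SOURCE B (Python) =====
-- def calculate_phred_scores(quality_scores):
--     """Calculates the sum and count of PHRED scores for a chunk (column-first)."""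
--     width = max(map(len, quality_scores), default=0)
--     phred_sums = []
--     counts = []
--     for i in range(width):
--         col = [line[i] for line in quality_scores if len(line) > i]
--         phred_sums.append(sum(ord(c) for c in col) - 33 * len(col))
--         counts.append(len(col))
--     return phred_sums, counts
-- ===== Notes on version B (the rewrite author's own statement) =====
-- stated objective: alternative
-- what changed: B computes the result column-first: it takes the maximum line length once, then for each column index gathers the characters of all lines long enough and emits that column's score sum and count, instead of A's per-line streaming that grows or updates two parallel accumulator lists entry by entry.
import Mathlib
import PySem

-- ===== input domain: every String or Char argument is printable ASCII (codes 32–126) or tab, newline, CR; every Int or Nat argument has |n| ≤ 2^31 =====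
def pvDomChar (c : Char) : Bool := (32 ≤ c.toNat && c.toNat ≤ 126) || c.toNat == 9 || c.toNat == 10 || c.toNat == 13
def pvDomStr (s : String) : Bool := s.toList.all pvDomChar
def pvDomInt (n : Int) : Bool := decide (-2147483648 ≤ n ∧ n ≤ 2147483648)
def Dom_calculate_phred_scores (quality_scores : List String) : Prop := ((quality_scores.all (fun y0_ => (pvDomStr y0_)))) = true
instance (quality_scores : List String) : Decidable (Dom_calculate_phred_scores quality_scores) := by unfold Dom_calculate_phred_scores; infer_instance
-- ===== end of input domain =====

-- B is column-first (transpose-style): one pass per column via a max-width scan, instead of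
-- A's grow-or-update of two parallel accumulators while streaming the lines; objective: alternative.

-- ===== PORT A =====
-- inner 'for index, char in enumerate(line)' loop of A
def pvInnerA : List Char → Nat → List Int → List Int → List Int × List Int
  | [], _, s, c => (s, c)
  | ch :: rest, idx, s, c =>
    let score : Int := (ch.toNat : Int) - 33
    if s.length ≤ idx then
      pvInnerA rest (idx + 1) (s ++ [score]) (c ++ [1])
    else
      pvInnerA rest (idx + 1) (s.set idx (s.getD idx 0 + score)) (c.set idx (c.getD idx 0 + 1))

def calculate_phred_scores (quality_scores : List String) : List Int × List Int :=
  quality_scores.foldl (fun ac line => pvInnerA line.toList 0 ac.1 ac.2) ([], [])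

-- ===== PORT B =====
def pvColPair (quality_scores : List String) (i : Nat) : Int × Int :=
  let col := quality_scores.filterMap (fun l => l.toList[i]?)
  (col.foldl (fun a c => a + (c.toNat : Int)) 0 - 33 * (col.length : Int),
   (col.length : Int))

def calculate_phred_scores_alt (quality_scores : List String) : List Int × List Int :=
  let width := (quality_scores.map (fun l => l.toList.length)).foldl max 0
  let pairs := (List.range width).map (pvColPair quality_scores)
  (pairs.map Prod.fst, pairs.map Prod.snd)

-- ===== PRECONDITION & SPEC =====
def Spec_calculate_phred_scores (quality_scores : List String) (out : List Int × List Int) : Prop := out = calculate_phred_scores_alt quality_scores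
instance (quality_scores : List String) (out : List Int × List Int) : Decidable (Spec_calculate_phred_scores quality_scores out) := by unfold Spec_calculate_phred_scores; infer_instance

-- ===== CLAIM (what is proved, stated in full; the proofs are below) =====
def Claim_equal_calculate_phred_scores : Prop := ∀ (quality_scores : List String), Dom_calculate_phred_scores quality_scores → Spec_calculate_phred_scores quality_scores (calculate_phred_scores quality_scores)

-- ===== LEMMAS AND PROOFS =====

-- single-component version of A's inner loop, with a generic per-character value v
def pvAdd (v : Char → Int) : List Char → Nat → List Int → List Int
  | [], _, s => s
  | ch :: rest, idx, s =>
    if s.length ≤ idx then pvAdd v rest (idx + 1) (s ++ [v ch])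
    else pvAdd v rest (idx + 1) (s.set idx (s.getD idx 0 + v ch))

def pvScore (c : Char) : Int := (c.toNat : Int) - 33
def pvOne (_ : Char) : Int := 1

-- contribution of one line to column i, when the line is laid down starting at column idx
def pvCol (v : Char → Int) : List Char → Nat → Nat → Int
  | [], _, _ => 0
  | ch :: rest, idx, i => (if i = idx then v ch else 0) + pvCol v rest (idx + 1) i

def pvColSum (v : Char → Int) : List String → Nat → Int
  | [], _ => 0
  | l :: L, i => pvCol v l.toList 0 i + pvColSum v L i

def pvFold (v : Char → Int) (s : List Int) (L : List String) : List Int :=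
  L.foldl (fun s l => pvAdd v l.toList 0 s) s

theorem pvInnerA_split (line : List Char) : ∀ (idx : Nat) (s c : List Int), s.length = c.length →
    pvInnerA line idx s c = (pvAdd pvScore line idx s, pvAdd pvOne line idx c) := by
  induction line with
  | nil => intro idx s c h; simp [pvInnerA, pvAdd]
  | cons ch rest ih =>
    intro idx s c h
    simp only [pvInnerA, pvAdd]
    by_cases hle : s.length ≤ idx
    · rw [if_pos hle, if_pos hle, if_pos (h ▸ hle)]
      exact ih _ _ _ (by simp [h])
    · rw [if_neg hle, if_neg hle, if_neg (h ▸ hle)]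
      exact ih _ _ _ (by simp [h])

theorem pvAdd_length (v : Char → Int) (line : List Char) : ∀ (idx : Nat) (s : List Int), idx ≤ s.length →
    (pvAdd v line idx s).length = max s.length (idx + line.length) := by
  induction line with
  | nil => intro idx s h; simp [pvAdd]; omega
  | cons ch rest ih =>
    intro idx s h
    simp only [pvAdd]
    by_cases hle : s.length ≤ idx
    · rw [if_pos hle, ih (idx + 1) (s ++ [v ch]) (by simp; omega)]
      simp; omega
    · rw [if_neg hle, ih (idx + 1) _ (by simp; omega)]
      simp; omega

theorem pvAdd_getD (v : Char → Int) (line : List Char) : ∀ (idx : Nat) (s : List Int) (i : Nat), idx ≤ s.length →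
    (pvAdd v line idx s).getD i 0 = s.getD i 0 + pvCol v line idx i := by
  induction line with
  | nil => intro idx s i h; simp [pvAdd, pvCol]
  | cons ch rest ih =>
    intro idx s i h
    simp only [pvAdd, pvCol]
    by_cases hle : s.length ≤ idx
    · rw [if_pos hle, ih (idx + 1) (s ++ [v ch]) i (by simp; omega)]
      have hsl : s.length = idx := by omega
      have : (s ++ [v ch]).getD i 0 = s.getD i 0 + (if i = idx then v ch else 0) := by
        by_cases hi : i = idx
        · subst hi
          simp [List.getD, hsl]
        · by_cases hlt : i < s.length
          · simp [List.getD, List.getElem?_append_left hlt, hi]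
          · have h1 : s[i]? = none := List.getElem?_eq_none_iff.mpr (by omega)
            have h2 : (s ++ [v ch])[i]? = none := List.getElem?_eq_none_iff.mpr (by simp; omega)
            simp [List.getD, h1, h2, hi]
      rw [this]; ring
    · rw [if_neg hle, ih (idx + 1) _ i (by simp; omega)]
      have hlt : idx < s.length := by omega
      have : (s.set idx (s.getD idx 0 + v ch)).getD i 0
           = s.getD i 0 + (if i = idx then v ch else 0) := by
        by_cases hi : i = idx
        · subst hi
          simp [List.getD, hlt]
        · simp [List.getD, List.getElem?_set_ne (by omega : idx ≠ i), hi]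
      rw [this]; ring

theorem pvFold_length (v : Char → Int) (L : List String) : ∀ (s : List Int),
    (pvFold v s L).length = L.foldl (fun w l => max w l.toList.length) s.length := by
  induction L with
  | nil => intro s; simp [pvFold]
  | cons l L ih =>
    intro s
    simp only [pvFold, List.foldl_cons]
    rw [show (List.foldl (fun s l => pvAdd v l.toList 0 s) (pvAdd v l.toList 0 s) L) = pvFold v (pvAdd v l.toList 0 s) L from rfl,
        ih, pvAdd_length v _ 0 s (Nat.zero_le _)]
    simp

theorem pvFold_getD (v : Char → Int) (L : List String) : ∀ (s : List Int) (i : Nat),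
    (pvFold v s L).getD i 0 = s.getD i 0 + pvColSum v L i := by
  induction L with
  | nil => intro s i; simp [pvFold, pvColSum]
  | cons l L ih =>
    intro s i
    simp only [pvFold, List.foldl_cons, pvColSum]
    rw [show (List.foldl (fun s l => pvAdd v l.toList 0 s) (pvAdd v l.toList 0 s) L) = pvFold v (pvAdd v l.toList 0 s) L from rfl,
        ih, pvAdd_getD v _ 0 s i (Nat.zero_le _)]
    ring

theorem pvCol_get? (v : Char → Int) (line : List Char) : ∀ (idx i : Nat),
    pvCol v line idx i = if idx ≤ i then ((getElem? line (i - idx)).map v).getD 0 else 0 := by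
  induction line with
  | nil => intro idx i; simp [pvCol]
  | cons ch rest ih =>
    intro idx i
    simp only [pvCol, ih (idx + 1) i]
    by_cases hi : i = idx
    · subst hi
      simp [show ¬ (i + 1 ≤ i) from by omega]
    · rw [if_neg hi]
      by_cases hle : idx ≤ i
      · rw [if_pos (by omega : idx + 1 ≤ i), if_pos hle]
        have : i - idx = (i - (idx + 1)) + 1 := by omega
        simp [this]
      · rw [if_neg (by omega : ¬ idx + 1 ≤ i), if_neg hle]
        simp

theorem pvFoldl_add (xs : List Char) : ∀ (a : Int),
    xs.foldl (fun a c => a + (c.toNat : Int)) a = a + xs.foldl (fun a c => a + (c.toNat : Int)) 0 := by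
  induction xs with
  | nil => intro a; simp
  | cons x xs ih =>
    intro a
    simp only [List.foldl_cons]
    rw [ih (a + x.toNat), ih ((0 : Int) + x.toNat)]
    ring

theorem pvColSum_score (L : List String) (i : Nat) :
    (L.filterMap (fun l => l.toList[i]?)).foldl (fun a c => a + (c.toNat : Int)) 0
      - 33 * ((L.filterMap (fun l => l.toList[i]?)).length : Int)
    = pvColSum pvScore L i := by
  induction L with
  | nil => simp [pvColSum]
  | cons l L ih =>
    simp only [pvColSum, List.filterMap_cons]
    rw [pvCol_get? pvScore l.toList 0 i]
    cases h : l.toList[i]? with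
    | none => simp [ih]
    | some c =>
      simp only [List.foldl_cons, List.length_cons]
      rw [pvFoldl_add]
      rw [← ih]
      simp [pvScore]
      ring

theorem pvColSum_one (L : List String) (i : Nat) :
    ((L.filterMap (fun l => l.toList[i]?)).length : Int) = pvColSum pvOne L i := by
  induction L with
  | nil => simp [pvColSum]
  | cons l L ih =>
    simp only [pvColSum, List.filterMap_cons]
    rw [pvCol_get? pvOne l.toList 0 i]
    cases h : l.toList[i]? with
    | none => simp [ih]
    | some c =>
      simp only [List.length_cons]
      rw [← ih]
      simp [pvOne]
      ring

theorem pvA_as_fold (L : List String) : ∀ (s c : List Int), s.length = c.length →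
    L.foldl (fun ac line => pvInnerA line.toList 0 ac.1 ac.2) (s, c) = (pvFold pvScore s L, pvFold pvOne c L) := by
  induction L with
  | nil => intro s c h; simp [pvFold]
  | cons l L ih =>
    intro s c h
    simp only [List.foldl_cons]
    rw [pvInnerA_split l.toList 0 s c h]
    exact ih _ _ (by rw [pvAdd_length _ _ _ _ (Nat.zero_le _), pvAdd_length _ _ _ _ (Nat.zero_le _), h])

theorem pvWidth_eq (L : List String) :
    (L.map (fun l => l.toList.length)).foldl max 0 = L.foldl (fun w l => max w l.toList.length) 0 := by
  rw [List.foldl_map]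

theorem pvComponent_eq (v : Char → Int) (f : List String → Nat → Int) (L : List String)
    (hf : ∀ i, f L i = pvColSum v L i) :
    pvFold v [] L = (List.range (L.foldl (fun w l => max w l.toList.length) 0)).map (fun i => f L i) := by
  apply List.ext_getElem
  · rw [pvFold_length]
    simp only [List.length_map, List.length_range, List.length_nil]
  · intro i h1 h2
    have hlen : (pvFold v [] L).length = L.foldl (fun w l => max w l.toList.length) 0 := by
      rw [pvFold_length]; rfl
    have : (pvFold v [] L)[i] = (pvFold v [] L).getD i 0 := by
      rw [List.getD, List.getElem?_eq_getElem h1]; rfl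
    rw [this, pvFold_getD]
    simp [hf]

-- ===== VERDICT (by name: the statement is the Claim_ definition above) =====
theorem calculate_phred_scores_spec : Claim_equal_calculate_phred_scores := by
  intro qs _
  show calculate_phred_scores qs = calculate_phred_scores_alt qs
  have hB : calculate_phred_scores_alt qs =
      (((List.range ((qs.map (fun l => l.toList.length)).foldl max 0)).map (pvColPair qs)).map Prod.fst,
       ((List.range ((qs.map (fun l => l.toList.length)).foldl max 0)).map (pvColPair qs)).map Prod.snd) := rfl
  have hA : calculate_phred_scores qs = (pvFold pvScore [] qs, pvFold pvOne [] qs) :=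
    pvA_as_fold qs [] [] rfl
  rw [hA, hB, pvWidth_eq, List.map_map, List.map_map]
  refine congrArg₂ Prod.mk ?_ ?_
  · rw [pvComponent_eq pvScore (fun L i => (pvColPair L i).1) qs (fun i => pvColSum_score qs i)]
    simp [Function.comp]
  · rw [pvComponent_eq pvOne (fun L i => (pvColPair L i).2) qs (fun i => pvColSum_one qs i)]
    simp [Function.comp]
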